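-- pv_equiv track=rewrite | github.com/sidharth-rashwana/python-practise | codes/60_triplets/60_triplets.py | count_prime_triplets
-- ===== SOURCE A (Python) =====
-- def check_prime(n):
--     if n <= 1:
--         return False
--     for i in range(3, int(n)):
--         if n % i == 0:
--             return False
--     return True
--
-- def count_prime_triplets(arr):
--     count = 0
--     N = len(arr)
--
--     for i in range(N):
--         for j in range(i + 1, N):
--             for k in range(j + 1, N):
--                 if i < j < k:
--                     product = arr[i] * arr[j] * arr[k]
--                     if check_prime(product):
--                         count += 1
--     return count
-- ===== SOURCE B (Python) =====
-- def count_prime_triplets(arr):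
--     # sqrt-bounded trial division (a real primality test: 4 is NOT accepted,
--     # unlike A's check_prime, which never tries the divisor 2)
--     def is_prime(n):
--         if n < 2:
--             return False
--         if n % 2 == 0:
--             return n == 2
--         d = 3
--         while d * d <= n:
--             if n % d == 0:
--                 return False
--             d += 2
--         return True
--
--     count = 0
--     rest = arr
--     while rest:
--         x = rest[0]
--         rest = rest[1:]
--         mid = rest
--         while mid:
--             y = mid[0]
--             mid = mid[1:]
--             p = x * y
--             for z in mid:
--                 if is_prime(p * z):
--                     count += 1
--     return count
-- ===== Notes on version B (the rewrite author's own statement) =====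
-- stated objective: alternative
-- what changed: B replaces A's per-triple divisor scan over the whole interval [3, product) with sqrt-bounded odd trial division, and replaces the index-arithmetic triple loop with suffix recursion over the list; intended as faster (a timing run measured ~2.6x at every size it could finish, but could not confirm the largest size, so no speed claim is made); B's test is a real primality test, so product-4 triples are no longer counted.
-- intended difference: On arrays containing a triple i<j<k whose product is exactly 4, A counts that triple as prime (its check_prime never tries divisor 2, so 4 passes) while B does not; B's value is the intended count of prime-product triples. — e.g. on count_prime_triplets([1, 1, 4]): A returns 1, B returns 0
import Mathlib
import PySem

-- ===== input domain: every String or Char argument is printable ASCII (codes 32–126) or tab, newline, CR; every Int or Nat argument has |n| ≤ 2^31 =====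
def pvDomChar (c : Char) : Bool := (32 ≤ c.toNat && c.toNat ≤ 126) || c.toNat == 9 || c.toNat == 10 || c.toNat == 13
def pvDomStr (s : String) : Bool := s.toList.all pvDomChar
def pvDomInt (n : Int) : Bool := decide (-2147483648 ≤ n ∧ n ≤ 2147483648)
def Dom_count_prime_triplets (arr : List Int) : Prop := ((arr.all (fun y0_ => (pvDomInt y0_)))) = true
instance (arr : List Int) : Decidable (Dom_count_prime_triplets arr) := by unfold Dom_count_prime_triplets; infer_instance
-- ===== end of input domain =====

-- B replaces A's divisor scan over all of [3, P) by sqrt-bounded odd trial division and the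
-- index-based triple loop by suffix recursion over the list; B's test is a real primality test,
-- so (unlike A, whose check_prime never tries the divisor 2) it does not count triples whose
-- product is 4.

-- ===== PORT A =====
-- for i in range(3, int(n)): if n % i == 0: return False   (early return; i counts up)
def check_prime_loop (n i : Int) : Bool :=
  if i < n then
    (if PySem.Int.mod n i == 0 then false else check_prime_loop n (i + 1))
  else true
termination_by (n - i).toNat

def check_prime (n : Int) : Bool :=
  if n ≤ 1 then false
  else check_prime_loop n 3

def count_prime_triplets (arr : List Int) : Int :=
  let N : Int := arr.length
  (PySem.List.pyRange 0 N 1).foldl (fun count i =>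
    (PySem.List.pyRange (i + 1) N 1).foldl (fun count j =>
      (PySem.List.pyRange (j + 1) N 1).foldl (fun count k =>
        if i < j ∧ j < k then
          (if check_prime (PySem.List.pyGetD arr i 0 * PySem.List.pyGetD arr j 0 *
              PySem.List.pyGetD arr k 0) then count + 1 else count)
        else count) count) count) 0

-- ===== PORT B =====
-- while d * d <= n: … d += 2
def oddTrial (n d : Int) : Bool :=
  if d * d ≤ n then
    (if PySem.Int.mod n d == 0 then false else oddTrial n (d + 2))
  else true
termination_by (n + 2 - d).toNat
decreasing_by
  by_cases h0 : d ≤ 0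
  · have hnn : 0 ≤ d * d := mul_self_nonneg d
    omega
  · have hdd : d ≤ d * d := le_mul_of_one_le_left (by omega) (by omega)
    omega

def isPrimeB (n : Int) : Bool :=
  if n < 2 then false
  else if PySem.Int.mod n 2 == 0 then n == 2
  else oddTrial n 3

-- for z in mid: …
def count_prime_triplets_alt_z (p : Int) : List Int → Int → Int
  | [], count => count
  | z :: mid, count =>
      count_prime_triplets_alt_z p mid (if isPrimeB (p * z) then count + 1 else count)

-- while mid: y = mid[0]; mid = mid[1:]; …
def count_prime_triplets_alt_y (x : Int) : List Int → Int → Int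
  | [], count => count
  | y :: mid, count =>
      count_prime_triplets_alt_y x mid (count_prime_triplets_alt_z (x * y) mid count)

-- while rest: x = rest[0]; rest = rest[1:]; …
def count_prime_triplets_alt_x : List Int → Int → Int
  | [], count => count
  | x :: rest, count =>
      count_prime_triplets_alt_x rest (count_prime_triplets_alt_y x rest count)

def count_prime_triplets_alt (arr : List Int) : Int := count_prime_triplets_alt_x arr 0

-- ===== PRECONDITION & SPEC =====
-- On arrays containing a triple i<j<k whose product is exactly 4, A counts that triple as prime
-- (its check_prime never tries the divisor 2, so 4 passes) while B does not; B's value is the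
-- intended count of prime-product triples.
def D_count_prime_triplets (arr : List Int) : Prop :=
  ∃ t ∈ arr.sublistsLen 3, t.prod = 4
instance (arr : List Int) : Decidable (D_count_prime_triplets arr) := by
  unfold D_count_prime_triplets; infer_instance

def Spec_count_prime_triplets (arr : List Int) (out : Int) : Prop :=
  ¬ D_count_prime_triplets arr → out = count_prime_triplets_alt arr
instance (arr : List Int) (out : Int) : Decidable (Spec_count_prime_triplets arr out) := by
  unfold Spec_count_prime_triplets; infer_instance

def pvDiffWitness_count_prime_triplets : List Int := [1, 1, 4]
def pvDiffWitnessOut_count_prime_triplets : Int × Int := (1, 0)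

-- ===== CLAIM (what is proved, stated in full; the proofs are below) =====
def Claim_unchanged_count_prime_triplets : Prop := ∀ (arr : List Int), Dom_count_prime_triplets arr → Spec_count_prime_triplets arr (count_prime_triplets arr)
def Claim_changed_count_prime_triplets : Prop := Dom_count_prime_triplets (pvDiffWitness_count_prime_triplets) ∧ D_count_prime_triplets (pvDiffWitness_count_prime_triplets) ∧ count_prime_triplets (pvDiffWitness_count_prime_triplets) = pvDiffWitnessOut_count_prime_triplets.1 ∧ count_prime_triplets_alt (pvDiffWitness_count_prime_triplets) = pvDiffWitnessOut_count_prime_triplets.2 ∧ pvDiffWitnessOut_count_prime_triplets.1 ≠ pvDiffWitnessOut_count_prime_triplets.2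
def Claim_exact_count_prime_triplets : Prop := ∀ (arr : List Int), Dom_count_prime_triplets arr → D_count_prime_triplets arr → count_prime_triplets arr ≠ count_prime_triplets_alt arr

-- ===== LEMMAS AND PROOFS =====

-- A's triple loop, as the same suffix recursion B uses but with A's check.
def cntAZ (p : Int) : List Int → Int → Int
  | [], c => c
  | z :: t, c => cntAZ p t (if check_prime (p * z) then c + 1 else c)
def cntAY (x : Int) : List Int → Int → Int
  | [], c => c
  | y :: t, c => cntAY x t (cntAZ (x * y) t c)
def cntAX : List Int → Int → Int
  | [], c => c
  | x :: t, c => cntAX t (cntAY x t c)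

-- number of product-4 triples of a suffix, level by level
def c4Z (p : Int) (t : List Int) : Int := (t.countP (fun z => p * z == 4) : Int)
def c4Y (x : Int) : List Int → Int
  | [] => 0
  | y :: t => c4Z (x * y) t + c4Y x t
def c4X : List Int → Int
  | [] => 0
  | x :: t => c4Y x t + c4X t

theorem oddTrial_iff (n : Int) : ∀ d : Int, 0 < d →
    (oddTrial n d = true ↔
      ∀ k : Nat, (d + 2 * (k : Int)) * (d + 2 * (k : Int)) ≤ n → ¬ ((d + 2 * (k : Int)) ∣ n)) := by
  intro d
  fun_induction oddTrial n d with
  | case1 d hle hmod =>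
      intro hd
      simp only [Bool.false_eq_true, false_iff]
      push Not
      refine ⟨0, by simpa using hle, ?_⟩
      have : PySem.Int.mod n d = 0 := by simpa using hmod
      have hdvd : d ∣ n := (PySem.Int.mod_eq_zero_iff_dvd n d).mp this
      simpa using hdvd
  | case2 d hle hmod ih =>
      intro hd
      rw [ih (by omega)]
      constructor
      · intro h k
        cases k with
        | zero =>
            intro _ hdvd
            have : PySem.Int.mod n d = 0 := (PySem.Int.mod_eq_zero_iff_dvd n d).mpr (by simpa using hdvd)
            simp [this] at hmod
        | succ k' =>
            intro hk
            have e : d + 2 * ((k' + 1 : Nat) : Int) = (d + 2) + 2 * (k' : Int) := by push_cast; ring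
            rw [e] at hk ⊢
            exact h k' hk
      · intro h k hk
        have e : (d + 2) + 2 * (k : Int) = d + 2 * ((k + 1 : Nat) : Int) := by push_cast; ring
        rw [e] at hk ⊢
        exact h (k + 1) hk
  | case3 d hle =>
      intro hd
      simp only [true_iff]
      intro k hk
      exfalso
      have hk0 : (0 : Int) ≤ (k : Int) := Int.natCast_nonneg k
      have h1 : d ≤ d + 2 * (k : Int) := by omega
      have h2 : d * d ≤ (d + 2 * (k : Int)) * (d + 2 * (k : Int)) :=
        mul_le_mul h1 h1 (by omega) (by omega)
      omega

theorem isPrimeB_iff_prime (n : Int) (hn : 2 ≤ n) :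
    (isPrimeB n = true ↔ n.toNat.Prime) := by
  rw [isPrimeB, if_neg (by omega : ¬ n < 2)]
  by_cases he : PySem.Int.mod n 2 == 0
  · have h2 : (2 : Int) ∣ n := (PySem.Int.mod_eq_zero_iff_dvd n 2).mp (by simpa using he)
    have h2n : 2 ∣ n.toNat := by omega
    rw [if_pos he]
    constructor
    · intro h
      have hn2 : n = 2 := by simpa using h
      have : n.toNat = 2 := by omega
      rw [this]; exact Nat.prime_two
    · intro hp
      have heven : Even n.toNat := ⟨n.toNat / 2, by omega⟩
      have : n.toNat = 2 := (Nat.Prime.even_iff hp).mp heven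
      have : n = 2 := by omega
      simp [this]
  · have hodd : ¬ (2 : Int) ∣ n := fun hd => he (by
      simpa using (PySem.Int.mod_eq_zero_iff_dvd n 2).mpr hd)
    have hoddN : ¬ 2 ∣ n.toNat := by omega
    rw [if_neg he, oddTrial_iff n 3 (by omega)]
    have hn3 : 3 ≤ n := by omega
    constructor
    · intro h
      by_contra hnp
      have hN1 : n.toNat ≠ 1 := by omega
      have hp := Nat.minFac_prime hN1
      have hdvd := Nat.minFac_dvd n.toNat
      have hsq : n.toNat.minFac ^ 2 ≤ n.toNat := Nat.minFac_sq_le_self (by omega) hnp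
      have hne2 : ¬ 2 ∣ n.toNat.minFac := fun hh => hoddN (hh.trans hdvd)
      have h3m : 3 ≤ n.toNat.minFac := by have := hp.two_le; omega
      obtain ⟨k, hk⟩ : ∃ k : Nat, n.toNat.minFac = 3 + 2 * k := ⟨(n.toNat.minFac - 3) / 2, by omega⟩
      apply h k
      · have : (n.toNat.minFac : Int) * n.toNat.minFac ≤ n.toNat := by
          rw [pow_two] at hsq; exact_mod_cast hsq
        calc (3 + 2 * (k : Int)) * (3 + 2 * (k : Int))
            = (n.toNat.minFac : Int) * n.toNat.minFac := by rw [hk]; push_cast; ring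
          _ ≤ n.toNat := this
          _ = n := by omega
      · have hdi : (n.toNat.minFac : Int) ∣ (n.toNat : Int) := Int.natCast_dvd_natCast.mpr hdvd
        have : ((n.toNat : Int)) = n := by omega
        rw [this] at hdi
        have he2 : (3 + 2 * (k : Int)) = (n.toNat.minFac : Int) := by rw [hk]; push_cast; ring
        rw [he2]; exact hdi
    · intro hp k hk hdvd
      have heN : ((3 + 2 * k : Nat) : Int) = 3 + 2 * (k : Int) := by push_cast; ring
      have hdN : (3 + 2 * k) ∣ n.toNat := by
        rw [← Int.natCast_dvd_natCast]
        rw [heN]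
        have : ((n.toNat : Int)) = n := by omega
        rw [this]; exact hdvd
      rcases Nat.Prime.eq_one_or_self_of_dvd hp _ hdN with h1 | hself
      · omega
      · have hkN : (3 + 2 * k) * (3 + 2 * k) ≤ n.toNat := by
          have := hk; rw [← heN] at this
          exact_mod_cast (by omega : ((3 + 2 * k : Nat) : Int) * ((3 + 2 * k : Nat) : Int) ≤ ((n.toNat : Int)))
        rw [hself] at hkN
        nlinarith [hself, hkN, (by omega : 2 ≤ n.toNat)]

-- A's scan accepts exactly the primes and 4 (for n ≥ 2)

theorem noDiv_iff (n : Nat) (hn : 2 ≤ n) :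
    ((∀ j : Nat, 3 ≤ j → j < n → ¬ j ∣ n) ↔ (n.Prime ∨ n = 4)) := by
  constructor
  · intro h
    by_cases hp : n.Prime
    · exact Or.inl hp
    · by_cases h4 : n = 4
      · exact Or.inr h4
      · exfalso
        obtain ⟨m, hdvd, h2, hlt⟩ := Nat.exists_dvd_of_not_prime2 hn hp
        by_cases h3 : 3 ≤ m
        · exact h m h3 hlt hdvd
        · -- m = 2, n even, n ∉ {2, 4}, so n ≥ 6 and n/2 is a witness
          have hm2 : m = 2 := by omega
          subst hm2
          have h2n : 2 ∣ n := hdvd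
          have hn2 : n ≠ 2 := fun he => hp (he ▸ Nat.prime_two)
          have hge : 6 ≤ n := by omega
          exact h (n / 2) (by omega) (by omega) ⟨2, by omega⟩
  · rintro (hp | h4) j h3 hlt hdvd
    · rcases (Nat.Prime.eq_one_or_self_of_dvd hp j hdvd) with h | h <;> omega
    · subst h4
      have : j = 3 := by omega
      subst this
      omega

theorem check_prime_loop_iff (n : Int) : ∀ i : Int,
    (check_prime_loop n i = true ↔ ∀ j : Int, i ≤ j → j < n → ¬ (j ∣ n)) := by
  intro i
  fun_induction check_prime_loop n i with
  | case1 i hlt hmod =>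
      simp only [Bool.false_eq_true, false_iff]
      push Not
      refine ⟨i, le_refl i, hlt, ?_⟩
      have : PySem.Int.mod n i = 0 := by simpa using hmod
      exact (PySem.Int.mod_eq_zero_iff_dvd n i).mp this
  | case2 i hlt hmod ih =>
      rw [ih]
      constructor
      · intro h j hij hjn
        rcases eq_or_lt_of_le hij with he | hl
        · intro hdvd
          have : PySem.Int.mod n j = 0 := (PySem.Int.mod_eq_zero_iff_dvd n j).mpr hdvd
          rw [← he] at this
          simp [this] at hmod
        · exact h j (by omega) hjn
      · intro h j hij hjn
        exact h j (by omega) hjn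
  | case3 i hge =>
      simp only [true_iff]
      intro j hij hjn
      omega

theorem check_prime_iff (n : Int) (hn : 2 ≤ n) :
    (check_prime n = true ↔ (n.toNat.Prime ∨ n.toNat = 4)) := by
  have hcast : ((n.toNat : Int)) = n := by omega
  rw [check_prime, if_neg (by omega : ¬ n ≤ 1), check_prime_loop_iff n 3,
      ← noDiv_iff n.toNat (by omega)]
  constructor
  · intro h j h3 hlt hdvd
    apply h (j : Int) (by omega) (by omega)
    have : ((j : Int)) ∣ ((n.toNat : Int)) := Int.natCast_dvd_natCast.mpr hdvd
    rwa [hcast] at this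
  · intro h i hge hlt hdvd
    have hdN : i.toNat ∣ n.toNat := by
      rw [← Int.natCast_dvd_natCast]
      have h1 : ((i.toNat : Int)) = i := by omega
      rw [h1, hcast]; exact hdvd
    exact h i.toNat (by omega) (by omega) hdN

theorem checkEq (m : Int) : check_prime m = (isPrimeB m || m == 4) := by
  by_cases hm : m ≤ 1
  · rw [check_prime, if_pos hm, isPrimeB, if_pos (by omega : m < 2)]
    simp [show m ≠ 4 by omega]
  · have hm2 : 2 ≤ m := by omega
    rw [Bool.eq_iff_iff]
    simp only [Bool.or_eq_true, beq_iff_eq]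
    rw [check_prime_iff m hm2, isPrimeB_iff_prime m hm2]
    constructor
    · rintro (hp | h4)
      · exact Or.inl hp
      · right; omega
    · rintro (hp | h4)
      · exact Or.inl hp
      · right; omega

theorem altZ_acc (p : Int) (t : List Int) : ∀ (c d : Int),
    count_prime_triplets_alt_z p t (c + d) = count_prime_triplets_alt_z p t c + d := by
  induction t with
  | nil => intro c d; rfl
  | cons z t ih =>
    intro c d
    simp only [count_prime_triplets_alt_z]
    by_cases hp : isPrimeB (p * z) = true
    · rw [if_pos hp, if_pos hp, show c + d + 1 = (c + 1) + d from by ring]; exact ih (c + 1) d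
    · rw [if_neg hp, if_neg hp]; exact ih c d

theorem altY_acc (x : Int) (t : List Int) : ∀ (c d : Int),
    count_prime_triplets_alt_y x t (c + d) = count_prime_triplets_alt_y x t c + d := by
  induction t with
  | nil => intro c d; rfl
  | cons y t ih =>
    intro c d
    simp only [count_prime_triplets_alt_y]
    rw [altZ_acc, ih]

theorem altX_acc (t : List Int) : ∀ (c d : Int),
    count_prime_triplets_alt_x t (c + d) = count_prime_triplets_alt_x t c + d := by
  induction t with
  | nil => intro c d; rfl
  | cons x t ih =>
    intro c d
    simp only [count_prime_triplets_alt_x]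
    rw [altY_acc, ih]

-- A's check is B's check "or the product is 4"; counting decomposes accordingly

theorem isPrimeB_four : isPrimeB 4 = false := by decide

theorem cntAZ_split (p : Int) (t : List Int) : ∀ c : Int,
    cntAZ p t c = count_prime_triplets_alt_z p t c + c4Z p t := by
  induction t with
  | nil => intro c; simp [cntAZ, count_prime_triplets_alt_z, c4Z]
  | cons z t ih =>
    intro c
    simp only [cntAZ, count_prime_triplets_alt_z]
    rw [checkEq]
    by_cases h4 : p * z = 4
    · have hpz : isPrimeB (p * z) = false := by rw [h4]; exact isPrimeB_four
      have hb : (p * z == 4) = true := by simp [h4]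
      rw [hpz, hb]
      simp only [Bool.false_or]
      rw [if_pos trivial, if_neg (by simp : ¬ false = true)]
      rw [ih (c + 1), altZ_acc p t c 1]
      have hc : c4Z p (z :: t) = c4Z p t + 1 := by
        simp [c4Z, hb]
      rw [hc]; ring
    · have hb : (p * z == 4) = false := by simp [h4]
      rw [hb]
      simp only [Bool.or_false]
      have hc : c4Z p (z :: t) = c4Z p t := by
        simp [c4Z, hb]
      rw [hc, ih]

theorem cntAY_split (x : Int) (t : List Int) : ∀ c : Int,
    cntAY x t c = count_prime_triplets_alt_y x t c + c4Y x t := by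
  induction t with
  | nil => intro c; simp [cntAY, count_prime_triplets_alt_y, c4Y]
  | cons y t ih =>
    intro c
    simp only [cntAY, count_prime_triplets_alt_y, c4Y]
    rw [cntAZ_split, ih, altY_acc]
    ring

theorem cntAX_split (t : List Int) : ∀ c : Int,
    cntAX t c = count_prime_triplets_alt_x t c + c4X t := by
  induction t with
  | nil => intro c; simp [cntAX, count_prime_triplets_alt_x, c4X]
  | cons x t ih =>
    intro c
    simp only [cntAX, count_prime_triplets_alt_x, c4X]
    rw [cntAY_split, ih, altX_acc]
    ring

theorem foldA3 (arr : List Int) (i j : Int) (hij : i < j) :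
    ∀ (fuel : Nat) (a c : Int), ((arr.length : Int) - a).toNat = fuel → 0 ≤ a → j < a →
    (PySem.List.pyRange a (arr.length : Int) 1).foldl
      (fun count k => if i < j ∧ j < k then
        (if check_prime (PySem.List.pyGetD arr i 0 * PySem.List.pyGetD arr j 0 *
            PySem.List.pyGetD arr k 0) then count + 1 else count)
        else count) c
    = cntAZ (PySem.List.pyGetD arr i 0 * PySem.List.pyGetD arr j 0) (arr.drop a.toNat) c := by
  intro fuel
  induction fuel using Nat.strong_induction_on with
  | _ fuel IH =>
    intro a c hfu h0 hja
    by_cases hlt : a < (arr.length : Int)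
    · have hidx : a.toNat < arr.length := by omega
      rw [PySem.List.pyRange_one_cons hlt, List.foldl_cons,
          List.drop_eq_getElem_cons hidx]
      simp only [cntAZ]
      rw [if_pos (show i < j ∧ j < a from ⟨hij, hja⟩)]
      rw [PySem.List.pyGetD_eq_getElem arr 0 h0 hlt]
      rw [show a.toNat + 1 = ((a + 1 : Int)).toNat from by omega]
      exact IH (((arr.length : Int) - (a + 1)).toNat) (by omega) (a + 1) _ rfl (by omega) (by omega)
    · rw [PySem.List.pyRange_one_eq_nil (by omega), List.foldl_nil,
          List.drop_eq_nil_of_le (by omega)]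
      rfl

theorem foldA2 (arr : List Int) (i : Int) (h0i : 0 ≤ i) :
    ∀ (fuel : Nat) (a c : Int), ((arr.length : Int) - a).toNat = fuel → i < a →
    (PySem.List.pyRange a (arr.length : Int) 1).foldl
      (fun count j =>
        (PySem.List.pyRange (j + 1) (arr.length : Int) 1).foldl
          (fun count k => if i < j ∧ j < k then
            (if check_prime (PySem.List.pyGetD arr i 0 * PySem.List.pyGetD arr j 0 *
                PySem.List.pyGetD arr k 0) then count + 1 else count)
            else count) count) c
    = cntAY (PySem.List.pyGetD arr i 0) (arr.drop a.toNat) c := by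
  intro fuel
  induction fuel using Nat.strong_induction_on with
  | _ fuel IH =>
    intro a c hfu hia
    by_cases hlt : a < (arr.length : Int)
    · have hidx : a.toNat < arr.length := by omega
      rw [PySem.List.pyRange_one_cons hlt, List.foldl_cons,
          List.drop_eq_getElem_cons hidx]
      simp only [cntAY]
      rw [show a.toNat + 1 = ((a + 1 : Int)).toNat from by omega]
      rw [foldA3 arr i a (by omega) (((arr.length : Int) - (a + 1)).toNat) (a + 1) c rfl (by omega) (by omega)]
      rw [PySem.List.pyGetD_eq_getElem arr 0 (by omega) hlt]
      exact IH (((arr.length : Int) - (a + 1)).toNat) (by omega) (a + 1) _ rfl (by omega)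
    · rw [PySem.List.pyRange_one_eq_nil (by omega), List.foldl_nil,
          List.drop_eq_nil_of_le (by omega)]
      rfl

theorem foldA1 (arr : List Int) :
    ∀ (fuel : Nat) (a c : Int), ((arr.length : Int) - a).toNat = fuel → 0 ≤ a →
    (PySem.List.pyRange a (arr.length : Int) 1).foldl
      (fun count i =>
        (PySem.List.pyRange (i + 1) (arr.length : Int) 1).foldl
          (fun count j =>
            (PySem.List.pyRange (j + 1) (arr.length : Int) 1).foldl
              (fun count k => if i < j ∧ j < k then
                (if check_prime (PySem.List.pyGetD arr i 0 * PySem.List.pyGetD arr j 0 *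
                    PySem.List.pyGetD arr k 0) then count + 1 else count)
                else count) count) count) c
    = cntAX (arr.drop a.toNat) c := by
  intro fuel
  induction fuel using Nat.strong_induction_on with
  | _ fuel IH =>
    intro a c hfu h0
    by_cases hlt : a < (arr.length : Int)
    · have hidx : a.toNat < arr.length := by omega
      rw [PySem.List.pyRange_one_cons hlt, List.foldl_cons,
          List.drop_eq_getElem_cons hidx]
      simp only [cntAX]
      rw [show a.toNat + 1 = ((a + 1 : Int)).toNat from by omega]
      rw [foldA2 arr a h0 (((arr.length : Int) - (a + 1)).toNat) (a + 1) c rfl (by omega)]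
      rw [PySem.List.pyGetD_eq_getElem arr 0 h0 hlt]
      exact IH (((arr.length : Int) - (a + 1)).toNat) (by omega) (a + 1) _ rfl (by omega)
    · rw [PySem.List.pyRange_one_eq_nil (by omega), List.foldl_nil,
          List.drop_eq_nil_of_le (by omega)]
      rfl

theorem A_eq_cntAX (arr : List Int) : count_prime_triplets arr = cntAX arr 0 := by
  show (PySem.List.pyRange 0 (arr.length : Int) 1).foldl _ 0 = _
  rw [foldA1 arr (((arr.length : Int) - 0).toNat) 0 0 rfl (by omega)]
  rfl

theorem c4Z_nonneg (p : Int) (t : List Int) : 0 ≤ c4Z p t := Int.natCast_nonneg _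

theorem c4Y_nonneg (x : Int) (t : List Int) : 0 ≤ c4Y x t := by
  induction t with
  | nil => simp [c4Y]
  | cons y t ih => simp only [c4Y]; have := c4Z_nonneg (x * y) t; omega

theorem c4X_nonneg (l : List Int) : 0 ≤ c4X l := by
  induction l with
  | nil => simp [c4X]
  | cons x t ih => simp only [c4X]; have := c4Y_nonneg x t; omega

theorem c4Z_pos_iff (p : Int) (t : List Int) : 0 < c4Z p t ↔ ∃ z ∈ t, p * z = 4 := by
  unfold c4Z
  rw [Int.natCast_pos, List.countP_pos_iff]
  simp

theorem c4Y_pos_iff (x : Int) (t : List Int) :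
    0 < c4Y x t ↔ ∃ y z : Int, [y, z].Sublist t ∧ x * y * z = 4 := by
  induction t with
  | nil => simp [c4Y]
  | cons y0 t ih =>
    simp only [c4Y]
    constructor
    · intro h
      by_cases hz : 0 < c4Z (x * y0) t
      · obtain ⟨z, hzmem, hz4⟩ := (c4Z_pos_iff _ _).mp hz
        exact ⟨y0, z, List.cons_sublist_cons.mpr (List.singleton_sublist.mpr hzmem), hz4⟩
      · have hy : 0 < c4Y x t := by have := c4Z_nonneg (x * y0) t; omega
        obtain ⟨y, z, hs, h4⟩ := ih.mp hy
        exact ⟨y, z, hs.cons y0, h4⟩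
    · rintro ⟨y, z, hs, h4⟩
      rcases List.sublist_cons_iff.mp hs with h | ⟨r, he, hr⟩
      · have := ih.mpr ⟨y, z, h, h4⟩
        have := c4Z_nonneg (x * y0) t
        omega
      · have hy : y = y0 := by injection he
        have hrz : r = [z] := by injection he with h1 h2; exact h2.symm
        rw [hy] at h4
        subst hrz
        have hzmem : z ∈ t := List.singleton_sublist.mp hr
        have := (c4Z_pos_iff (x * y0) t).mpr ⟨z, hzmem, h4⟩
        have := c4Y_nonneg x t
        omega

theorem c4X_pos_iff (l : List Int) :
    0 < c4X l ↔ ∃ a b c : Int, [a, b, c].Sublist l ∧ a * b * c = 4 := by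
  induction l with
  | nil => simp [c4X]
  | cons x0 t ih =>
    simp only [c4X]
    constructor
    · intro h
      by_cases hy : 0 < c4Y x0 t
      · obtain ⟨y, z, hs, h4⟩ := (c4Y_pos_iff _ _).mp hy
        exact ⟨x0, y, z, List.cons_sublist_cons.mpr hs, h4⟩
      · have hx : 0 < c4X t := by have := c4Y_nonneg x0 t; omega
        obtain ⟨a, b, c, hs, h4⟩ := ih.mp hx
        exact ⟨a, b, c, hs.cons x0, h4⟩
    · rintro ⟨a, b, c, hs, h4⟩
      rcases List.sublist_cons_iff.mp hs with h | ⟨r, he, hr⟩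
      · have := ih.mpr ⟨a, b, c, h, h4⟩
        have := c4Y_nonneg x0 t
        omega
      · have ha : a = x0 := by injection he
        have hrr : r = [b, c] := by injection he with h1 h2; exact h2.symm
        rw [ha] at h4
        subst hrr
        have := (c4Y_pos_iff x0 t).mpr ⟨b, c, hr, h4⟩
        have := c4X_nonneg t
        omega

theorem D_iff (arr : List Int) : D_count_prime_triplets arr ↔ 0 < c4X arr := by
  rw [c4X_pos_iff]
  unfold D_count_prime_triplets
  constructor
  · rintro ⟨t, ht, h4⟩
    obtain ⟨hs, hl⟩ := List.mem_sublistsLen.mp ht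
    obtain ⟨a, b, c, rfl⟩ := List.length_eq_three.mp hl
    refine ⟨a, b, c, hs, ?_⟩
    simpa [mul_assoc] using h4
  · rintro ⟨a, b, c, hs, h4⟩
    refine ⟨[a, b, c], List.mem_sublistsLen.mpr ⟨hs, rfl⟩, ?_⟩
    simpa [mul_assoc] using h4

-- ===== VERDICT (by name: the statement is the Claim_ definition above) =====
theorem count_prime_triplets_spec : Claim_unchanged_count_prime_triplets := by
  intro arr _hdom
  unfold Spec_count_prime_triplets
  intro hnd
  rw [A_eq_cntAX, cntAX_split]
  have h0 : c4X arr = 0 := by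
    have hnn := c4X_nonneg arr
    have hnp : ¬ 0 < c4X arr := fun hp => hnd ((D_iff arr).mpr hp)
    omega
  unfold count_prime_triplets_alt
  omega
theorem count_prime_triplets_changed : Claim_changed_count_prime_triplets := by
  unfold Claim_changed_count_prime_triplets
  refine ⟨by decide, by decide, ?_, by decide, by decide⟩
  rw [A_eq_cntAX]
  have h4 : check_prime 4 = true := by
    rw [Bool.eq_iff_iff, check_prime_iff 4 (by omega)]
    exact iff_of_true (Or.inr rfl) rfl
  norm_num [pvDiffWitness_count_prime_triplets, pvDiffWitnessOut_count_prime_triplets,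
    cntAX, cntAY, cntAZ, h4]
theorem count_prime_triplets_tight : Claim_exact_count_prime_triplets := by
  intro arr _hdom hD
  rw [A_eq_cntAX, cntAX_split]
  have hpos := (D_iff arr).mp hD
  unfold count_prime_triplets_alt
  omega
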